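-- pv_equiv track=rewrite | github.com/luizferreira/hackerrank-in-python | algorithms/strings/weighted_uniform_strings.py | weights_list
-- ===== SOURCE A (Python) =====
-- def weights_list(string):
--     weights = set()
--
--     while(len(string) > 0):
--
--         char = string[0]
--         accumulated_weight = 0
--         i = 0
--         while(i < len(string) and string[i] == char):
--             accumulated_weight += char_weight(char)
--             weights.add(accumulated_weight)
--             i += 1
--         string = string[i:]
--
--     return weights
--
-- def char_weight(char):
--     return ord(char) - ord('a') + 1
-- ===== SOURCE B (Python) =====
-- def weights_list(string):
--     weights = set()
--     prev = None
--     acc = 0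
--     for c in string:
--         if prev == c:
--             acc += char_weight(c)
--         else:
--             prev = c
--             acc = char_weight(c)
--         weights.add(acc)
--     return weights
--
-- def char_weight(char):
--     return ord(char) - ord('a') + 1
-- ===== Notes on version B (the rewrite author's own statement) =====
-- stated objective: faster
-- what changed: Replaced the nested while loops with repeated string slicing (quadratic copying) by a single linear pass over the characters that tracks the current run character and running weight.
import Mathlib
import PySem

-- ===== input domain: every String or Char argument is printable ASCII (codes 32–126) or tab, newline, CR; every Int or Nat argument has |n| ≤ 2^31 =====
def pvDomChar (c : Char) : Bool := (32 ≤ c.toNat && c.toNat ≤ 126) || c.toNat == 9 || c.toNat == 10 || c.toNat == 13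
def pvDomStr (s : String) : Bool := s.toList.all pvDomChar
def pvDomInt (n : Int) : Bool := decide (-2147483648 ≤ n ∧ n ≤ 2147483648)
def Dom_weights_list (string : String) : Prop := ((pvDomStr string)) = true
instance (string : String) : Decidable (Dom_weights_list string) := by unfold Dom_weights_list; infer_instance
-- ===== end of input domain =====

-- B replaces A's nested while loops with repeated slicing by one linear pass tracking the
-- current run character and running weight (objective: faster, asymptotic).
-- The insertion order into the set is identical, so the element lists agree exactly.

-- ===== PORT A =====
def pvCharWeight (char : Char) : Int := (char.toNat : Int) - ('a'.toNat : Int) + 1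

-- inner while loop of A over the current string: 'i < len(string) and string[i] == char'
-- walks the remaining characters; returns (string[i:], accumulated_weight, weights)
def pvInner (char : Char) (acc : Int) (w : PySem.Set Int) : List Char → List Char × Int × PySem.Set Int
  | [] => ([], acc, w)
  | c :: rs =>
    if c = char then
      pvInner char (acc + pvCharWeight char) (PySem.Set.add w (acc + pvCharWeight char)) rs
    else (c :: rs, acc, w)

-- outer while loop of A ('while len(string) > 0: … string = string[i:]'); the fuel only
-- makes the same computation total (each round consumes at least one character)
def pvOuter (fuel : Nat) (cs : List Char) (w : PySem.Set Int) : PySem.Set Int :=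
  match fuel, cs with
  | 0, _ => w
  | _, [] => w
  | fuel + 1, c :: t =>
    let r := pvInner c (0 + pvCharWeight c) (PySem.Set.add w (0 + pvCharWeight c)) t
    pvOuter fuel r.1 r.2.2

def weights_list (string : String) : List Int :=
  pvOuter string.toList.length string.toList PySem.Set.empty

-- ===== PORT B =====
-- single linear pass: state (prev run character, running weight, weights)
def pvStep (st : Option Char × Int × PySem.Set Int) (c : Char) :
    Option Char × Int × PySem.Set Int :=
  let acc := if st.1 = some c then st.2.1 + pvCharWeight c else pvCharWeight c
  (some c, acc, PySem.Set.add st.2.2 acc)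

def weights_list_alt (string : String) : List Int :=
  (string.toList.foldl pvStep (none, 0, PySem.Set.empty)).2.2

-- ===== PRECONDITION & SPEC =====
def Spec_weights_list (string : String) (out : List Int) : Prop := out = weights_list_alt string
instance (string : String) (out : List Int) : Decidable (Spec_weights_list string out) := by unfold Spec_weights_list; infer_instance

-- ===== CLAIM (what is proved, stated in full; the proofs are below) =====
def Claim_equal_weights_list : Prop := ∀ (string : String), Dom_weights_list string → Spec_weights_list string (weights_list string)

-- ===== LEMMAS AND PROOFS =====

-- the inner loop only drops characters
theorem pvInner_len (char : Char) : ∀ (rest : List Char) (acc : Int) (w : PySem.Set Int),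
    (pvInner char acc w rest).1.length ≤ rest.length := by
  intro rest
  induction rest with
  | nil => intro acc w; simp [pvInner]
  | cons c rs ih =>
    intro acc w
    by_cases hc : c = char
    · simp only [pvInner, if_pos hc]
      exact le_trans (ih _ _) (by simp)
    · simp [pvInner, hc]

-- the inner loop stops at the first character different from char
theorem pvInner_stop (char : Char) : ∀ (rest : List Char) (acc : Int) (w : PySem.Set Int)
    (d : Char), (pvInner char acc w rest).1.head? = some d → d ≠ char := by
  intro rest
  induction rest with
  | nil => intro acc w d h; simp [pvInner] at h
  | cons c rs ih =>
    intro acc w d h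
    by_cases hc : c = char
    · simp only [pvInner, if_pos hc] at h
      exact ih _ _ _ h
    · simp only [pvInner, if_neg hc, List.head?_cons] at h
      injection h with h
      exact h ▸ hc

-- the B-fold over one run equals the inner loop of A
theorem fold_run (char : Char) : ∀ (rest : List Char) (acc : Int) (w : PySem.Set Int),
    rest.foldl pvStep (some char, acc, w) =
      (pvInner char acc w rest).1.foldl pvStep
        (some char, (pvInner char acc w rest).2.1, (pvInner char acc w rest).2.2) := by
  intro rest
  induction rest with
  | nil => intro acc w; rfl
  | cons c rs ih =>
    intro acc w
    by_cases hc : c = char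
    · subst hc
      simp only [pvInner, List.foldl_cons]
      have hstep : pvStep (some c, acc, w) c =
          (some c, acc + pvCharWeight c, PySem.Set.add w (acc + pvCharWeight c)) := by
        simp [pvStep]
      rw [hstep]
      exact ih _ _
    · simp only [pvInner, if_neg hc]

-- A's outer loop equals B's fold, for any fold state that cannot merge with the head
theorem outer_eq : ∀ (fuel : Nat) (cs : List Char) (prev : Option Char) (acc : Int)
    (w : PySem.Set Int), cs.length ≤ fuel →
    (∀ c, cs.head? = some c → prev ≠ some c) →
    pvOuter fuel cs w = (cs.foldl pvStep (prev, acc, w)).2.2 := by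
  intro fuel
  induction fuel with
  | zero =>
    intro cs prev acc w hn _
    have h0 : cs = [] := List.eq_nil_of_length_eq_zero (by omega)
    subst h0; rfl
  | succ n ih =>
    intro cs prev acc w hn hprev
    match cs with
    | [] => rfl
    | c :: t =>
      have hne : prev ≠ some c := hprev c rfl
      have hstep : pvStep (prev, acc, w) c =
          (some c, pvCharWeight c, PySem.Set.add w (pvCharWeight c)) := by
        simp [pvStep, hne]
      have hz : (0 : Int) + pvCharWeight c = pvCharWeight c := by ring
      simp only [pvOuter, hz, List.foldl_cons, hstep, fold_run c t (pvCharWeight c)]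
      apply ih
      · have := pvInner_len c t (pvCharWeight c) (PySem.Set.add w (pvCharWeight c))
        simp only [List.length_cons] at hn
        omega
      · intro d hd heq
        have := pvInner_stop c t (pvCharWeight c) (PySem.Set.add w (pvCharWeight c)) d hd
        injection heq with heq
        exact this heq.symm

-- ===== VERDICT (by name: the statement is the Claim_ definition above) =====
theorem weights_list_spec : Claim_equal_weights_list := by
  intro s _
  unfold Spec_weights_list weights_list weights_list_alt
  exact outer_eq s.toList.length s.toList none 0 PySem.Set.empty le_rfl
    (fun c _ h => by simp at h)
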